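-- pv_equiv track=rewrite | github.com/KotDev/KUBSU_individual | summer_tasks/task_3/DNF_and_num_stability.py | internal_stability_num
-- ===== SOURCE A (Python) =====
-- def internal_stability_num(list_vertex: list, len_vertex: int) -> int:
--     """ Функция нахождения числа внутренней устойчивости графа
--         param: list_vertex: list
--         param: len_vertex: int
--         return: int
--     """
--     vertex_2 = []  # создаём список для конъюнкции 2х скобок
--     set_vertex = []  # создаём список который будет хранить все элементы ДНФ с учётом операции поглощения
--     index = 0  # индекс для list_vertex
--     while len(list_vertex) > 1:  # пока не сделаем конъюнкцию всех скобок
--         for i in list_vertex[index]:  # проходим по связям (xi, xj)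
--             for j in list_vertex[index + 1]:  # проходим по связям (xi + 1, xj + 1)
--                 vertex_2.append(i + " " + j)  # записываем перемножение скобок (xi, xj) (xi + 1, xj + 1)
--         list_vertex.pop(index)  # удаляем (xi, xj) из list_vertex
--         list_vertex.pop(index)  # удаляем (xi + 1, xj + 1) из list_vertex
--         list_vertex.insert(index, vertex_2)   # добавляем перемноженную скобку в list_vertex
--         vertex_2 = []  # очищаем список в котором перемножали скобки
--     list_vertex = list_vertex[0]
--
--     for elem in list_vertex:  # проходимся по ДНФ и выполняем закон поглощения
--         if set(elem.split()) not in set_vertex:  # проверяем что такого элемента нет в списке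
--             set_vertex.append(set(elem.split()))  # добавляем в список элемент
--     # находим дизъюнкт состоящий из минимальных элементов, разность кол-во всех вершин и минимального дизъюнкта
--     return len_vertex - len(min(set_vertex, key=lambda x: len(x)))
-- ===== SOURCE B (Python) =====
-- def internal_stability_num(list_vertex: list, len_vertex: int) -> int:
--     """DFS over clauses with a running variable set; no term strings are built
--     and the input list is never mutated (A pops/inserts on it; return value only)."""
--     def best(i, acc):
--         if i == len(list_vertex):
--             return len(acc)
--         return min(best(i + 1, acc | set(e.split())) for e in list_vertex[i])
--     return len_vertex - best(0, set())
-- ===== Notes on version B (the rewrite author's own statement) =====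
-- stated objective: alternative
-- what changed: A repeatedly string-multiplies adjacent clauses into one flat DNF term list (mutating list_vertex in place), then deduplicates token-sets by a membership scan and takes the minimum; B builds no term strings and no dedup list at all: a depth-first recursion over the clauses carries the running variable set and returns len_vertex minus the minimum distinct-variable count (B does not mutate list_vertex; return-value equivalence only).
import Mathlib
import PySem

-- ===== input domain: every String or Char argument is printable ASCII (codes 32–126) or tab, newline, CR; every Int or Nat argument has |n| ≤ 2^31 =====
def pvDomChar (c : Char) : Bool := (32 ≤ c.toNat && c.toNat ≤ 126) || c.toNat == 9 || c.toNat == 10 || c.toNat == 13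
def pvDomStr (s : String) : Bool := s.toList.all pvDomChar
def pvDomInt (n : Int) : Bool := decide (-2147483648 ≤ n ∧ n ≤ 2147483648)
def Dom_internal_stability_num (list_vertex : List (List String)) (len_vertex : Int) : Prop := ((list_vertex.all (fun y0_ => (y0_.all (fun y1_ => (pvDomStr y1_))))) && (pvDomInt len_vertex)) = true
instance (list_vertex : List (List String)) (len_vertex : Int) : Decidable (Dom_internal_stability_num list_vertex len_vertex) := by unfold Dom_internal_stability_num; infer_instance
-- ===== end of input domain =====

-- B replaces A's pairwise string-multiplication of clauses + set-absorption membership scan by a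
-- direct DFS over the clauses carrying the running variable set (return-value equivalence only:
-- A mutates list_vertex in place, B does not).

-- ===== PORT A =====
-- inner two for-loops of one while-iteration: vertex_2.append(i + " " + j)
def pvMulStep (c1 c2 : List String) : List String :=
  c1.foldl (fun acc i => c2.foldl (fun acc j => acc ++ [i ++ " " ++ j]) acc) []

-- while len(list_vertex) > 1: pop clauses 0 and 1, insert their product at 0
def pvMulLoop : List (List String) → List (List String)
  | [] => []
  | [c] => [c]
  | c1 :: c2 :: rest => pvMulLoop (pvMulStep c1 c2 :: rest)
termination_by l => l.length
decreasing_by simp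

def internal_stability_num (list_vertex : List (List String)) (len_vertex : Int) : Int :=
  match pvMulLoop list_vertex with
  | [] => 0        -- Python: IndexError on list_vertex[0] (excluded by Pre_)
  | dnf :: _ =>    -- list_vertex = list_vertex[0]
    -- absorption loop: if set(elem.split()) not in set_vertex: set_vertex.append(...)
    -- ('in' on a list of sets compares by Python set equality = PySem.Set.equal)
    let set_vertex := dnf.foldl (fun acc elem =>
      if acc.any (fun s => PySem.Set.equal s (PySem.Set.ofList (PySem.Str.split₀ elem))) then acc
      else acc ++ [PySem.Set.ofList (PySem.Str.split₀ elem)]) ([] : List (PySem.Set String))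
    match PySem.List.min? set_vertex (fun x => x.length) with
    | some m => len_vertex - (m.length : Int)
    | none => 0    -- Python: ValueError from min() (excluded by Pre_)

-- ===== PORT B =====
-- min(...) over a generator: none = ValueError (empty generator or a ValueError below)
def pvMinList : List (Option Int) → Option Int
  | [] => none
  | x :: xs => xs.foldl (fun m y =>
      match m, y with
      | some a, some b => some (min a b)
      | _, _ => none) x

-- best(i, acc), recursing on the remaining clauses
def pvBest : List (List String) → PySem.Set String → Option Int
  | [], acc => some (acc.length : Int)
  | c :: rest, acc =>
      pvMinList (c.map (fun e =>
        pvBest rest (PySem.Set.union acc (PySem.Set.ofList (PySem.Str.split₀ e)))))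

def internal_stability_num_alt (list_vertex : List (List String)) (len_vertex : Int) : Int :=
  match pvBest list_vertex PySem.Set.empty with
  | some m => len_vertex - m
  | none => 0      -- Python: ValueError from min() (excluded by Pre_)

-- ===== PRECONDITION & SPEC =====
-- A raises IndexError on list_vertex = [] and ValueError (min of empty sequence) when some clause
-- is empty; Pre_ excludes exactly those inputs.
def Pre_internal_stability_num (list_vertex : List (List String)) (len_vertex : Int) : Prop :=
  list_vertex ≠ [] ∧ ∀ c ∈ list_vertex, c ≠ []
instance (list_vertex : List (List String)) (len_vertex : Int) : Decidable (Pre_internal_stability_num list_vertex len_vertex) := by unfold Pre_internal_stability_num; infer_instance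

def pvWitness_internal_stability_num : List (List String) × Int := ([["x1 x2", "x3"], ["x2", "x4 x1"]], 4)

def Spec_internal_stability_num (list_vertex : List (List String)) (len_vertex : Int) (out : Int) : Prop := out = internal_stability_num_alt list_vertex len_vertex
instance (list_vertex : List (List String)) (len_vertex : Int) (out : Int) : Decidable (Spec_internal_stability_num list_vertex len_vertex out) := by unfold Spec_internal_stability_num; infer_instance

-- ===== CLAIM (what is proved, stated in full; the proofs are below) =====
def Claim_equal_internal_stability_num : Prop := ∀ (list_vertex : List (List String)) (len_vertex : Int), Dom_internal_stability_num list_vertex len_vertex → Pre_internal_stability_num list_vertex len_vertex → Spec_internal_stability_num list_vertex len_vertex (internal_stability_num list_vertex len_vertex)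

-- ===== LEMMAS AND PROOFS =====

theorem go_acc (s : List Char) (cur : List Char) (acc : List (List Char)) :
    PySem.Chars.split₀.go s cur acc = acc.reverse ++ PySem.Chars.split₀.go s cur [] := by
  induction s generalizing cur acc with
  | nil => simp [PySem.Chars.split₀.go]; split <;> simp
  | cons c rest ih =>
    simp only [PySem.Chars.split₀.go]
    split
    · split
      · exact ih [] acc
      · rw [ih [] (cur.reverse :: acc), ih [] [cur.reverse]]; simp
    · exact ih _ _

theorem go_append (b : List Char) (a cur : List Char) :
    PySem.Chars.split₀.go (a ++ ' ' :: b) cur [] =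
      PySem.Chars.split₀.go a cur [] ++ PySem.Chars.split₀.go b [] [] := by
  induction a generalizing cur with
  | nil =>
    simp only [List.nil_append, PySem.Chars.split₀.go]
    have h : PySem.Chars.isspace ' ' = true := by decide
    rw [h]; simp only [if_true]
    split
    · simp
    · rw [go_acc b [] [cur.reverse]]
  | cons c a ih =>
    simp only [List.cons_append, PySem.Chars.split₀.go]
    split
    · split
      · exact ih []
      · rw [go_acc (a ++ ' ' :: b) [] [cur.reverse], go_acc a [] [cur.reverse], ih []]
        simp
    · exact ih _

theorem pv_splitc_append (a b : List Char) :
    PySem.Chars.split₀ (a ++ ' ' :: b) = PySem.Chars.split₀ a ++ PySem.Chars.split₀ b := by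
  simp only [PySem.Chars.split₀]; exact go_append b a []
theorem pv_split_append (i j : String) :
    PySem.Str.split₀ (i ++ " " ++ j) = PySem.Str.split₀ i ++ PySem.Str.split₀ j := by
  simp [PySem.Str.split₀, String.toList_append]
  rw [pv_splitc_append]; simp

theorem pv_upd_add {α : Type} [BEq α] [LawfulBEq α] (s t : PySem.Set α) (x : α) :
    PySem.Set.update s (PySem.Set.add t x) = PySem.Set.add (PySem.Set.update s t) x := by
  by_cases hx : t.contains x
  · have h1 : PySem.Set.add t x = t := by rw [PySem.Set.add, if_pos hx]
    have h2 : x ∈ PySem.Set.update s t := by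
      rw [PySem.Set.mem_update]; right; exact List.mem_of_elem_eq_true hx
    rw [h1]
    have hc : (PySem.Set.update s t).contains x = true := List.elem_eq_true_of_mem h2
    rw [PySem.Set.add, if_pos hc]
  · have h1 : PySem.Set.add t x = t ++ [x] := by rw [PySem.Set.add, if_neg hx]
    rw [h1, PySem.Set.update, List.foldl_append]
    rfl

theorem pv_upd_upd {α : Type} [BEq α] [LawfulBEq α] (s t : PySem.Set α) (l : List α) :
    PySem.Set.update s (PySem.Set.update t l) = PySem.Set.update (PySem.Set.update s t) l := by
  induction l generalizing t with
  | nil => rfl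
  | cons x l ih =>
    show PySem.Set.update s (PySem.Set.update (PySem.Set.add t x) l) = _
    rw [ih (PySem.Set.add t x)]
    show _ = PySem.Set.update (PySem.Set.update (PySem.Set.update s t) [x]) l
    rw [show PySem.Set.update (PySem.Set.update s t) [x] = PySem.Set.add (PySem.Set.update s t) x from rfl,
        pv_upd_add]

theorem pv_upd_ofList {α : Type} [BEq α] [LawfulBEq α] (s : PySem.Set α) (l : List α) :
    PySem.Set.update s (PySem.Set.ofList l) = PySem.Set.update s l := by
  rw [PySem.Set.ofList, show List.foldl PySem.Set.add PySem.Set.empty l = PySem.Set.update PySem.Set.empty l from rfl,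
      pv_upd_upd]
  rfl

def pvOComb : Option Int → Option Int → Option Int
  | some a, some b => some (min a b)
  | _, _ => none

theorem pv_minList_cons' (x : Option Int) (t : List (Option Int)) :
    pvMinList (x :: t) = t.foldl pvOComb x := rfl

theorem pv_ocomb_assoc (a b c : Option Int) : pvOComb (pvOComb a b) c = pvOComb a (pvOComb b c) := by
  cases a <;> cases b <;> cases c <;> simp [pvOComb, min_assoc]

theorem pv_foldl_ocomb (u : List (Option Int)) (m y : Option Int) :
    u.foldl pvOComb (pvOComb m y) = pvOComb m (u.foldl pvOComb y) := by
  induction u generalizing y with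
  | nil => rfl
  | cons z u ih => simp only [List.foldl_cons, pv_ocomb_assoc, ih]

theorem pv_minList_cons (x : Option Int) (t : List (Option Int)) (ht : t ≠ []) :
    pvMinList (x :: t) = pvOComb x (pvMinList t) := by
  obtain ⟨y, u, rfl⟩ := List.exists_cons_of_ne_nil ht
  rw [pv_minList_cons', pv_minList_cons', List.foldl_cons, pv_foldl_ocomb]

theorem pv_minList_append (a b : List (Option Int)) (ha : a ≠ []) (hb : b ≠ []) :
    pvMinList (a ++ b) = pvOComb (pvMinList a) (pvMinList b) := by
  obtain ⟨x, t, rfl⟩ := List.exists_cons_of_ne_nil ha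
  obtain ⟨y, u, rfl⟩ := List.exists_cons_of_ne_nil hb
  rw [List.cons_append, pv_minList_cons', List.foldl_append, List.foldl_cons, pv_foldl_ocomb,
      pv_minList_cons', pv_minList_cons']

theorem pv_minList_flatMap {α : Type} (l : List α) (g : α → List (Option Int))
    (hl : l ≠ []) (hg : ∀ i ∈ l, g i ≠ []) :
    pvMinList (l.flatMap g) = pvMinList (l.map (fun i => pvMinList (g i))) := by
  induction l with
  | nil => exact absurd rfl hl
  | cons x l ih =>
    cases l with
    | nil => rw [List.flatMap_cons, List.flatMap_nil, List.append_nil]; rfl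
    | cons y l' =>
      have hl' : (y :: l') ≠ [] := by simp
      have hfm : (y :: l').flatMap g ≠ [] := by
        have := hg y (by simp)
        simp only [List.flatMap_cons]
        exact fun h => this (List.append_eq_nil_iff.mp h).1
      rw [List.flatMap_cons, pv_minList_append _ _ (hg x (by simp)) hfm,
          ih hl' (fun i hi => hg i (List.mem_cons_of_mem _ hi)),
          show List.map (fun i => pvMinList (g i)) (x :: y :: l') =
            pvMinList (g x) :: List.map (fun i => pvMinList (g i)) (y :: l') from rfl,
          pv_minList_cons _ _ (by simp)]

theorem pv_minList_map_some {α : Type} (f : α → Int) (l : List α) (hl : l ≠ []) :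
    ∃ y ∈ l, pvMinList (l.map (fun e => some (f e))) = some (f y) ∧ ∀ z ∈ l, f y ≤ f z := by
  induction l with
  | nil => exact absurd rfl hl
  | cons x l ih =>
    cases l with
    | nil => exact ⟨x, by simp, by simp [pvMinList], by simp⟩
    | cons y l' =>
      obtain ⟨w, hw, hval, hmin⟩ := ih (by simp)
      rw [List.map_cons, pv_minList_cons _ _ (by simp), hval]
      by_cases h : f x ≤ f w
      · exact ⟨x, by simp, by simp [pvOComb, min_eq_left h], fun z hz => by
          rcases List.mem_cons.mp hz with rfl | hz
          · exact le_refl _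
          · exact le_trans h (hmin z hz)⟩
      · push_neg at h
        exact ⟨w, List.mem_cons_of_mem _ hw, by simp [pvOComb, min_eq_right h.le], fun z hz => by
          rcases List.mem_cons.mp hz with rfl | hz
          · exact h.le
          · exact hmin z hz⟩

def pvTok (e : String) : PySem.Set String := PySem.Set.ofList (PySem.Str.split₀ e)

theorem pv_mulStep_eq (c1 c2 : List String) :
    pvMulStep c1 c2 = c1.flatMap (fun i => c2.map (fun j => i ++ " " ++ j)) := by
  unfold pvMulStep
  simp only [PySem.List.foldl_append_singleton_eq_map]
  rw [PySem.List.foldl_append_eq_flatMap]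
  simp

theorem pv_minList_all_none {α : Type} (l : List α) :
    pvMinList (l.map (fun _ => (none : Option Int))) = none := by
  cases l with
  | nil => rfl
  | cons x l =>
    rw [List.map_cons, pv_minList_cons']
    induction l with
    | nil => rfl
    | cons y l ih => simpa using ih

theorem pv_upd_append {α : Type} [BEq α] (s : PySem.Set α) (a b : List α) :
    PySem.Set.update s (a ++ b) = PySem.Set.update (PySem.Set.update s a) b :=
  List.foldl_append

theorem pv_union_assoc (acc : PySem.Set String) (i j : String) :
    PySem.Set.union acc (pvTok (i ++ " " ++ j)) =
      PySem.Set.union (PySem.Set.union acc (pvTok i)) (pvTok j) := by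
  show PySem.Set.update acc (pvTok (i ++ " " ++ j)) = _
  rw [pvTok, pv_split_append, pv_upd_ofList, pv_upd_append]
  show _ = PySem.Set.update (PySem.Set.update acc (pvTok i)) (pvTok j)
  rw [pvTok, pvTok, pv_upd_ofList, pv_upd_ofList]

theorem pv_bestStep (c1 c2 : List String) (rest : List (List String)) (acc : PySem.Set String) :
    pvBest (c1 :: c2 :: rest) acc = pvBest (pvMulStep c1 c2 :: rest) acc := by
  rw [pv_mulStep_eq]
  show pvMinList (c1.map (fun i => pvBest (c2 :: rest) (PySem.Set.union acc (pvTok i)))) =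
    pvMinList ((c1.flatMap (fun i => c2.map (fun j => i ++ " " ++ j))).map
      (fun e => pvBest rest (PySem.Set.union acc (pvTok e))))
  rw [List.map_flatMap]
  rcases eq_or_ne c1 [] with rfl | h1
  · rfl
  rcases eq_or_ne c2 [] with rfl | h2
  · show pvMinList (c1.map (fun _ => pvMinList [])) = _
    have h : (List.flatMap (fun a => List.map (fun e => pvBest rest (PySem.Set.union acc (pvTok e)))
        (List.map (fun j => a ++ " " ++ j) ([] : List String))) c1) = [] := by simp
    rw [h]
    simp only [show (pvMinList [] : Option Int) = none from rfl, pv_minList_all_none]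
  · rw [pv_minList_flatMap _ _ h1 (fun i _ => by simp [h2])]
    congr 1
    refine List.map_congr_left (fun i _ => ?_)
    show pvMinList (c2.map (fun j => pvBest rest (PySem.Set.union (PySem.Set.union acc (pvTok i)) (pvTok j)))) = _
    rw [List.map_map]
    congr 1
    refine List.map_congr_left (fun j _ => ?_)
    show pvBest rest (PySem.Set.union (PySem.Set.union acc (pvTok i)) (pvTok j)) =
      pvBest rest (PySem.Set.union acc (pvTok (i ++ " " ++ j)))
    rw [pv_union_assoc]

theorem pv_best_eq_minList (lv : List (List String)) (acc : PySem.Set String) (h : lv ≠ []) :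
    pvBest lv acc = pvMinList ((pvMulLoop lv).headD [] |>.map (fun e =>
      some (((PySem.Set.union acc (PySem.Set.ofList (PySem.Str.split₀ e))).length : Int)))) := by
  induction lv using pvMulLoop.induct with
  | case1 => exact absurd rfl h
  | case2 c =>
    rw [show pvMulLoop [c] = [c] from by rw [pvMulLoop]]
    rfl
  | case3 c1 c2 rest ih =>
    rw [pv_bestStep, ih (by simp)]
    conv_rhs => rw [pvMulLoop]

theorem pv_mulLoop_singleton (lv : List (List String)) (h : lv ≠ []) (hc : ∀ c ∈ lv, c ≠ []) :
    ∃ d, pvMulLoop lv = [d] ∧ d ≠ [] := by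
  induction lv using pvMulLoop.induct with
  | case1 => exact absurd rfl h
  | case2 c => exact ⟨c, by rw [pvMulLoop], hc c (by simp)⟩
  | case3 c1 c2 rest ih =>
    have h1 := hc c1 (by simp)
    have h2 := hc c2 (by simp)
    obtain ⟨i, t1, rfl⟩ := List.exists_cons_of_ne_nil h1
    obtain ⟨j, t2, rfl⟩ := List.exists_cons_of_ne_nil h2
    have hstep : pvMulStep (i :: t1) (j :: t2) ≠ [] := by
      rw [pv_mulStep_eq]
      intro hh
      have : (i ++ " " ++ j) ∈ (List.flatMap (fun i => List.map (fun j => i ++ " " ++ j) (j :: t2)) (i :: t1)) := by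
        simp [List.mem_flatMap]
      rw [hh] at this
      exact absurd this (List.not_mem_nil)
    obtain ⟨d, hd, hdne⟩ := ih (by simp) (by
      intro c hcmem
      rcases List.mem_cons.mp hcmem with rfl | hcm
      · exact hstep
      · exact hc c (by simp [hcm]))
    exact ⟨d, by rw [pvMulLoop]; exact hd, hdne⟩

def pvAbsStep (acc : List (PySem.Set String)) (elem : String) : List (PySem.Set String) :=
  if acc.any (fun s => PySem.Set.equal s (pvTok elem)) then acc else acc ++ [pvTok elem]

theorem pv_abs_mono (d : List String) (acc : List (PySem.Set String)) (x : PySem.Set String)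
    (hx : x ∈ acc) : x ∈ d.foldl pvAbsStep acc := by
  induction d generalizing acc with
  | nil => exact hx
  | cons e d ih =>
    refine ih _ ?_
    unfold pvAbsStep
    split <;> simp [hx]

theorem pv_abs_sub (d : List String) (acc : List (PySem.Set String)) (x : PySem.Set String)
    (hx : x ∈ d.foldl pvAbsStep acc) : x ∈ acc ∨ ∃ e ∈ d, x = pvTok e := by
  induction d generalizing acc with
  | nil => exact Or.inl hx
  | cons e d ih =>
    rcases ih _ hx with h | ⟨e', he', rfl⟩
    · unfold pvAbsStep at h
      split at h
      · exact Or.inl h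
      · rcases List.mem_append.mp h with h | h
        · exact Or.inl h
        · exact Or.inr ⟨e, by simp, by simpa using h⟩
    · exact Or.inr ⟨e', by simp [he'], rfl⟩

theorem pv_equal_refl (s : PySem.Set String) : PySem.Set.equal s s = true := by
  simp [PySem.Set.equal, PySem.Set.issubset, List.all_eq_true]

theorem pv_abs_cover (d : List String) (acc : List (PySem.Set String)) (e : String) (he : e ∈ d) :
    ∃ x ∈ d.foldl pvAbsStep acc, PySem.Set.equal x (pvTok e) = true := by
  induction d generalizing acc with
  | nil => exact absurd he (List.not_mem_nil)
  | cons e0 d ih =>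
    rcases List.mem_cons.mp he with rfl | he'
    · rw [List.foldl_cons]
      unfold pvAbsStep
      split
      · rename_i hany
        obtain ⟨x, hx, hxeq⟩ := List.any_eq_true.mp hany
        exact ⟨x, pv_abs_mono _ _ _ hx, hxeq⟩
      · exact ⟨pvTok e, pv_abs_mono _ _ _ (by simp), pv_equal_refl _⟩
    · exact ih _ he'

theorem pv_equal_len (x y : PySem.Set String) (h : PySem.Set.equal x y = true)
    (hx : x.Nodup) (hy : y.Nodup) : x.length = y.length := by
  rw [PySem.Set.equal, Bool.and_eq_true] at h
  have hs : ∀ (a b : PySem.Set String), PySem.Set.issubset a b = true → a ⊆ b := by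
    intro a b hab z hz
    have := (List.all_eq_true.mp hab) z hz
    exact List.mem_of_elem_eq_true this
  have key : ∀ (a b : List String), a.Nodup → a ⊆ b → a.length ≤ b.length := by
    intro a b ha hab
    calc a.length = a.toFinset.card := (List.toFinset_card_of_nodup ha).symm
    _ ≤ b.toFinset.card := Finset.card_le_card (fun z hz => List.mem_toFinset.mpr (hab (List.mem_toFinset.mp hz)))
    _ ≤ b.length := List.toFinset_card_le b
  exact le_antisymm (key x y hx (hs _ _ h.1)) (key y x hy (hs _ _ h.2))

theorem pv_final (lv : List (List String)) (n : Int) (hne : lv ≠ []) (hcl : ∀ c ∈ lv, c ≠ []) :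
    internal_stability_num lv n = internal_stability_num_alt lv n := by
  obtain ⟨d, hML, hd⟩ := pv_mulLoop_singleton lv hne hcl
  have hB : pvBest lv PySem.Set.empty = pvMinList (d.map (fun e => some (((pvTok e).length : Int)))) := by
    rw [pv_best_eq_minList lv _ hne, hML]
    show pvMinList (d.map (fun e =>
      some (((PySem.Set.union PySem.Set.empty (PySem.Set.ofList (PySem.Str.split₀ e))).length : Int)))) = _
    congr 1
    refine List.map_congr_left (fun e _ => ?_)
    have hu : PySem.Set.union PySem.Set.empty (PySem.Set.ofList (PySem.Str.split₀ e)) = pvTok e := by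
      show PySem.Set.update PySem.Set.empty (PySem.Set.ofList (PySem.Str.split₀ e)) = _
      rw [pv_upd_ofList]
      rfl
    rw [hu]
  obtain ⟨y, hy, hval, hmin⟩ := pv_minList_map_some (fun e => ((pvTok e).length : Int)) d hd
  unfold internal_stability_num_alt
  rw [hB, hval]
  unfold internal_stability_num
  rw [hML]
  show (match PySem.List.min? (d.foldl pvAbsStep []) (fun x => x.length) with
        | some m => n - (m.length : Int)
        | none => 0) = n - ((pvTok y).length : Int)
  obtain ⟨x0, hx0mem, hx0eq⟩ := pv_abs_cover d [] y hy
  cases hm : PySem.List.min? (d.foldl pvAbsStep []) (fun x => x.length) with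
  | none =>
    rw [PySem.List.min?_eq_none_iff] at hm
    rw [hm] at hx0mem
    exact absurd hx0mem (List.not_mem_nil)
  | some m =>
    have hmm : m ∈ d.foldl pvAbsStep [] := PySem.List.min?_mem hm
    rcases pv_abs_sub d [] m hmm with h | ⟨e, he, rfl⟩
    · exact absurd h (List.not_mem_nil)
    · have h1 : ((pvTok y).length : Int) ≤ ((pvTok e).length : Int) := hmin e he
      have hx0nodup : x0.Nodup := by
        rcases pv_abs_sub d [] x0 hx0mem with h | ⟨e', _, rfl⟩
        · exact absurd h (List.not_mem_nil)
        · exact PySem.Set.nodup_ofList _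
      have hx0len : x0.length = (pvTok y).length :=
        pv_equal_len _ _ hx0eq hx0nodup (PySem.Set.nodup_ofList _)
      have h2 : (pvTok e).length ≤ x0.length := PySem.List.min?_isMin hm x0 hx0mem
      show n - ((pvTok e).length : Int) = n - ((pvTok y).length : Int)
      omega

-- ===== VERDICT (by name: the statement is the Claim_ definition above) =====
theorem internal_stability_num_spec : Claim_equal_internal_stability_num := by
  intro lv n _ hpre
  unfold Spec_internal_stability_num
  exact pv_final lv n hpre.1 hpre.2
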